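-- pv_equiv track=rewrite | github.com/Shuesh/Public_Scripts | AOC_2021/Day_17/Solution_17_p1.py | Y_Velocities
-- ===== SOURCE A (Python) =====
-- def Y_Velocities(y_range, x_velocities):
--
--     y_velocities = []
--     for velocity in x_velocities:
--         step_number = 0
--         y_coord = 0
--         y_velocity = velocity
--         while y_coord > y_range[0]:
--             step_number += 1
--             y_coord += y_velocity
--             y_velocity -= 1
--             if y_coord >= y_range[0] and y_coord <= y_range[-1] and step_number >= x_velocities[0]:
--                 y_velocities.append(y_velocity)
--
--     return y_velocities
-- ===== SOURCE B (Python) =====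
-- def Y_Velocities(y_range, x_velocities):
--     # Closed-form y(s) plus binary search for the stopping step, instead of step-by-step simulation.
--     out = []
--     if not x_velocities:
--         return out
--     lo, hi, m = y_range[0], y_range[-1], x_velocities[0]
--     for v in x_velocities:
--         if lo >= 0:
--             # projectile starts at y = 0, which is already at/below the band floor: no steps occur
--             continue
--         # doubled position after s steps: yd(s) = 2*v*s - s*(s-1)  (y(s) = yd(s)/2)
--         ub = 2 * max(v, 0) + 1 + 2 * (-lo)   # proven: yd(ub) <= 2*lo
--         a, b = 1, ub
--         while a < b:                          # first s in [1, ub] with yd(s) <= 2*lo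
--             mid = (a + b) // 2
--             if 2 * v * mid - mid * (mid - 1) <= 2 * lo:
--                 b = mid
--             else:
--                 a = mid + 1
--         S = a
--         out.extend(v - s for s in range(1, S + 1)
--                    if s >= m and 2 * lo <= 2 * v * s - s * (s - 1) <= 2 * hi)
--     return out
-- ===== Notes on version B (the rewrite author's own statement) =====
-- stated objective: alternative
-- what changed: B replaces A's step-by-step mutable simulation of the projectile with the closed-form doubled position yd(s)=2*v*s-s*(s-1), finds the stopping step by binary search under a proven analytic upper bound, and emits the answers by filtering the step range.
import Mathlib
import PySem

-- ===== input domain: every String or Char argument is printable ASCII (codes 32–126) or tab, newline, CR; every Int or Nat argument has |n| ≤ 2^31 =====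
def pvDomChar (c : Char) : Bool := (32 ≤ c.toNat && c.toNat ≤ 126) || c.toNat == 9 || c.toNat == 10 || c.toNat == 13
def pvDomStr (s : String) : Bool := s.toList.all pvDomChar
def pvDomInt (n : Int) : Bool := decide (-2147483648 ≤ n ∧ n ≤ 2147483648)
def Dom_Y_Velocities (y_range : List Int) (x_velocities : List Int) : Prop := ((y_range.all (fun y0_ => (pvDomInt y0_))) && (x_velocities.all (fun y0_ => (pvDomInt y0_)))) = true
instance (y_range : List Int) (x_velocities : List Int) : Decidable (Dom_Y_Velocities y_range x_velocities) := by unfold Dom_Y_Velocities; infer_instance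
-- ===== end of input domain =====

-- B computes the position after s steps in closed form and binary-searches for the stopping
-- step instead of simulating step by step (objective: alternative algorithm, similar cost).

-- ===== PORT A =====
-- A's while loop; lo = y_range[0], hi = y_range[-1], m = x_velocities[0] are loop-invariant
-- reads hoisted out (Python re-reads the same constant values each iteration).
def pvALoop (lo hi m : Int) (stepn y vel : Int) : List Int :=
  if h : y > lo then
    (if lo ≤ y + vel ∧ y + vel ≤ hi ∧ m ≤ stepn + 1 then [vel - 1] else []) ++
      pvALoop lo hi m (stepn + 1) (y + vel) (vel - 1)
  else []
termination_by ((vel + 1).toNat, (y - lo).toNat)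
decreasing_by
  by_cases h0 : 0 ≤ vel
  · exact Prod.Lex.left _ _ (by omega)
  · have he : (vel - 1 + 1).toNat = (vel + 1).toNat := by omega
    rw [he]
    exact Prod.Lex.right _ (by omega)

def Y_Velocities (y_range : List Int) (x_velocities : List Int) : List Int :=
  -- lo/hi/m are only ever read by Python when the respective list is nonempty (Pre_); the
  -- `.getD 0` defaults are never observed on inputs satisfying Pre_Y_Velocities.
  let lo := (PySem.List.pyGet? y_range 0).getD 0
  let hi := (PySem.List.pyGet? y_range (-1)).getD 0
  let m := (PySem.List.pyGet? x_velocities 0).getD 0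
  x_velocities.foldl (fun acc v => acc ++ pvALoop lo hi m 0 0 v) []

-- ===== PORT B =====
-- doubled position after s steps: yd v s = 2*v*s - s*(s-1)  (the true position times 2)
def pvYd (v s : Int) : Int := 2 * v * s - s * (s - 1)

-- Source B's binary-search while loop: first s in [a, b] with yd v s ≤ twoLo
def pvBsearch (v twoLo a b : Int) : Int :=
  if a < b then
    let mid := PySem.Int.floordiv (a + b) 2
    if pvYd v mid ≤ twoLo then pvBsearch v twoLo a mid else pvBsearch v twoLo (mid + 1) b
  else a
termination_by (b - a).toNat
decreasing_by
  · have h1 : PySem.Int.floordiv (a + b) 2 < b := by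
      rw [PySem.Int.floordiv_lt_iff_lt_mul (by omega)]; omega
    have h2 : a ≤ PySem.Int.floordiv (a + b) 2 := by
      rw [PySem.Int.le_floordiv_iff_mul_le (by omega)]; omega
    omega
  · have h1 : PySem.Int.floordiv (a + b) 2 < b := by
      rw [PySem.Int.floordiv_lt_iff_lt_mul (by omega)]; omega
    have h2 : a ≤ PySem.Int.floordiv (a + b) 2 := by
      rw [PySem.Int.le_floordiv_iff_mul_le (by omega)]; omega
    omega

def Y_Velocities_alt (y_range : List Int) (x_velocities : List Int) : List Int :=
  match x_velocities with
  | [] => []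
  | _ :: _ =>
    let lo := (PySem.List.pyGet? y_range 0).getD 0
    let hi := (PySem.List.pyGet? y_range (-1)).getD 0
    let m := (PySem.List.pyGet? x_velocities 0).getD 0
    x_velocities.foldl (fun acc v =>
      if 0 ≤ lo then acc
      else
        let S := pvBsearch v (2 * lo) 1 (2 * max v 0 + 1 + 2 * (-lo))
        acc ++ ((PySem.List.pyRange 1 (S + 1) 1).filter
            (fun s => decide (m ≤ s) && decide (2 * lo ≤ pvYd v s) && decide (pvYd v s ≤ 2 * hi))).map
            (fun s => v - s)) []

-- ===== PRECONDITION & SPEC =====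
-- Pre_ excludes exactly the inputs on which Python A raises IndexError (y_range empty while
-- x_velocities is nonempty); B raises there too.
def Pre_Y_Velocities (y_range : List Int) (x_velocities : List Int) : Prop :=
  x_velocities = [] ∨ y_range ≠ []
instance (y_range : List Int) (x_velocities : List Int) : Decidable (Pre_Y_Velocities y_range x_velocities) := by
  unfold Pre_Y_Velocities; infer_instance

def pvWitness_Y_Velocities : List Int × List Int := ([-10, -5], [7, 2, 0])

def Spec_Y_Velocities (y_range : List Int) (x_velocities : List Int) (out : List Int) : Prop := out = Y_Velocities_alt y_range x_velocities
instance (y_range : List Int) (x_velocities : List Int) (out : List Int) : Decidable (Spec_Y_Velocities y_range x_velocities out) := by unfold Spec_Y_Velocities; infer_instance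

-- ===== CLAIM (what is proved, stated in full; the proofs are below) =====
def Claim_equal_Y_Velocities : Prop := ∀ (y_range : List Int) (x_velocities : List Int), Dom_Y_Velocities y_range x_velocities → Pre_Y_Velocities y_range x_velocities → Spec_Y_Velocities y_range x_velocities (Y_Velocities y_range x_velocities)

-- ===== LEMMAS AND PROOFS =====

-- once the doubled position is at or below 2*lo (< 0), it stays there
lemma pvP_step (lo v s : Int) (hlo : lo < 0) (hs : 0 ≤ s) (h : pvYd v s ≤ 2 * lo) :
    pvYd v (s + 1) ≤ 2 * lo := by
  have hv : v < s := by
    by_contra hc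
    push_neg at hc
    have h0 : 0 ≤ pvYd v s := by
      unfold pvYd
      nlinarith [mul_le_mul_of_nonneg_right hc hs, mul_self_nonneg s]
    linarith
  have he : pvYd v (s + 1) = pvYd v s + 2 * (v - s) := by unfold pvYd; ring
  linarith

lemma pvP_mono (lo v : Int) (hlo : lo < 0) (t u : Int) (ht : 0 ≤ t) (htu : t ≤ u)
    (h : pvYd v t ≤ 2 * lo) : pvYd v u ≤ 2 * lo := by
  have key : ∀ k : Nat, pvYd v (t + k) ≤ 2 * lo := by
    intro k
    induction k with
    | zero => simpa using h
    | succ n ih =>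
      have hstep := pvP_step lo v (t + n) hlo (by omega) ih
      have he : t + ((n : Nat) + 1 : Nat) = (t + n) + 1 := by push_cast; ring
      rw [he]; exact hstep
  have he : u = t + ((u - t).toNat : Int) := by omega
  rw [he]; exact key _

lemma pvP_ub (lo v : Int) (hlo : lo < 0) :
    pvYd v (2 * max v 0 + 1 + 2 * (-lo)) ≤ 2 * lo := by
  have h1 : v ≤ max v 0 := le_max_left _ _
  have h2 : (0 : Int) ≤ max v 0 := le_max_right _ _
  set U : Int := 2 * max v 0 + 1 + 2 * (-lo) with hU
  have hU1 : 1 ≤ U := by omega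
  have hkey : 2 * v - U + 1 ≤ 2 * lo := by omega
  have hfact : pvYd v U = U * (2 * v - U + 1) := by unfold pvYd; ring
  nlinarith [mul_nonneg (by omega : (0:Int) ≤ U - 1) (by omega : (0:Int) ≤ -(2 * v - U + 1))]

-- binary search returns the first index with pvYd v · ≤ twoLo
lemma pvBsearch_spec (v twoLo : Int) : ∀ (n : Nat) (a b : Int), (b - a).toNat ≤ n →
    a ≤ b → pvYd v b ≤ twoLo → ¬ pvYd v (a - 1) ≤ twoLo →
    a ≤ pvBsearch v twoLo a b ∧ pvBsearch v twoLo a b ≤ b ∧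
      pvYd v (pvBsearch v twoLo a b) ≤ twoLo ∧ ¬ pvYd v (pvBsearch v twoLo a b - 1) ≤ twoLo := by
  intro n
  induction n with
  | zero =>
    intro a b hn hab hb ha
    have hEq : a = b := by omega
    subst hEq
    rw [pvBsearch.eq_def, if_neg (lt_irrefl a)]
    exact ⟨le_refl _, le_refl _, hb, ha⟩
  | succ n ih =>
    intro a b hn hab hb ha
    rw [pvBsearch.eq_def]
    by_cases hlt : a < b
    · rw [if_pos hlt]
      have hmid1 : a ≤ PySem.Int.floordiv (a + b) 2 := by
        rw [PySem.Int.le_floordiv_iff_mul_le (by omega)]; omega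
      have hmid2 : PySem.Int.floordiv (a + b) 2 < b := by
        rw [PySem.Int.floordiv_lt_iff_lt_mul (by omega)]; omega
      by_cases hP : pvYd v (PySem.Int.floordiv (a + b) 2) ≤ twoLo
      · rw [if_pos hP]
        obtain ⟨p1, p2, p3, p4⟩ :=
          ih a (PySem.Int.floordiv (a + b) 2) (by omega) hmid1 hP ha
        exact ⟨p1, by omega, p3, p4⟩
      · rw [if_neg hP]
        obtain ⟨p1, p2, p3, p4⟩ :=
          ih (PySem.Int.floordiv (a + b) 2 + 1) b (by omega) (by omega) hb
            (by simpa using hP)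
        exact ⟨by omega, p2, p3, p4⟩
    · rw [if_neg hlt]
      have hEq : a = b := by omega
      subst hEq
      exact ⟨le_refl _, le_refl _, hb, ha⟩

-- A's simulation loop, started at step s with the closed-form state, produces exactly the
-- filtered step range up to the first stopping step S
lemma pvALoop_eq (lo hi m v S : Int) (hlo : lo < 0) (hS1 : 1 ≤ S)
    (hPS : pvYd v S ≤ 2 * lo) (hleast : ∀ t, 0 ≤ t → t < S → ¬ pvYd v t ≤ 2 * lo) :
    ∀ (n : Nat) (s y : Int), (S - s).toNat ≤ n → 0 ≤ s → 2 * y = pvYd v s →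
    pvALoop lo hi m s y (v - s) =
      ((PySem.List.pyRange (s + 1) (S + 1) 1).filter
          (fun t => decide (m ≤ t) && decide (2 * lo ≤ pvYd v t) && decide (pvYd v t ≤ 2 * hi))).map
        (fun t => v - t) := by
  intro n
  induction n with
  | zero =>
    intro s y hn hs hy
    have hSs : S ≤ s := by omega
    have hPs : pvYd v s ≤ 2 * lo := pvP_mono lo v hlo S s (by omega) hSs hPS
    rw [pvALoop.eq_def, dif_neg (by omega : ¬ y > lo)]
    rw [PySem.List.pyRange_one_eq_nil (by omega)]
    simp
  | succ n ih =>
    intro s y hn hs hy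
    by_cases hSs : S ≤ s
    · have hPs : pvYd v s ≤ 2 * lo := pvP_mono lo v hlo S s (by omega) hSs hPS
      rw [pvALoop.eq_def, dif_neg (by omega : ¬ y > lo)]
      rw [PySem.List.pyRange_one_eq_nil (by omega)]
      simp
    · push_neg at hSs
      have hns : ¬ pvYd v s ≤ 2 * lo := hleast s hs hSs
      have hgt : y > lo := by omega
      rw [pvALoop.eq_def, dif_pos hgt]
      have hy' : 2 * (y + (v - s)) = pvYd v (s + 1) := by
        unfold pvYd at hy ⊢; linear_combination hy
      have hmeas : (S - (s + 1)).toNat ≤ n := by omega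
      have hrec := ih (s + 1) (y + (v - s)) hmeas (by omega) hy'
      have hvel : v - s - 1 = v - (s + 1) := by ring
      rw [hvel, hrec]
      conv_rhs => rw [PySem.List.pyRange_one_cons (by omega : s + 1 < S + 1)]
      rw [List.filter_cons]
      by_cases hc : lo ≤ y + (v - s) ∧ y + (v - s) ≤ hi ∧ m ≤ s + 1
      · have hb : (decide (m ≤ s + 1) && decide (2 * lo ≤ pvYd v (s + 1)) &&
            decide (pvYd v (s + 1) ≤ 2 * hi)) = true := by
          simp only [Bool.and_eq_true, decide_eq_true_eq]
          refine ⟨⟨hc.2.2, by omega⟩, by omega⟩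
        rw [if_pos hc, hb]
        simp
      · have hb : (decide (m ≤ s + 1) && decide (2 * lo ≤ pvYd v (s + 1)) &&
            decide (pvYd v (s + 1) ≤ 2 * hi)) = false := by
          simp only [Bool.and_eq_false_iff, decide_eq_false_iff_not]
          by_contra hcc
          push_neg at hcc
          exact hc ⟨by omega, by omega, hcc.1.1⟩
        rw [if_neg hc, hb]
        simp

-- per-velocity bodies of the two folds agree
lemma pvBody_eq (lo hi m v : Int) :
    pvALoop lo hi m 0 0 v =
      (if 0 ≤ lo then ([] : List Int)
       else
        ((PySem.List.pyRange 1 (pvBsearch v (2 * lo) 1 (2 * max v 0 + 1 + 2 * (-lo)) + 1) 1).filter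
            (fun s => decide (m ≤ s) && decide (2 * lo ≤ pvYd v s) && decide (pvYd v s ≤ 2 * hi))).map
          (fun s => v - s)) := by
  by_cases hlo : 0 ≤ lo
  · rw [if_pos hlo, pvALoop.eq_def, dif_neg (by omega : ¬ (0:Int) > lo)]
  · push_neg at hlo
    rw [if_neg (by omega : ¬ (0:Int) ≤ lo)]
    have hub : pvYd v (2 * max v 0 + 1 + 2 * (-lo)) ≤ 2 * lo := pvP_ub lo v hlo
    have hub1 : (1 : Int) ≤ 2 * max v 0 + 1 + 2 * (-lo) := by
      have := le_max_right v 0; omega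
    have h0 : ¬ pvYd v (1 - 1) ≤ 2 * lo := by simp [pvYd]; omega
    obtain ⟨hS1, hSub, hPS, hPS1⟩ :=
      pvBsearch_spec v (2 * lo) ((2 * max v 0 + 1 + 2 * (-lo)) - 1).toNat 1
        (2 * max v 0 + 1 + 2 * (-lo)) (by omega) hub1 hub h0
    set S := pvBsearch v (2 * lo) 1 (2 * max v 0 + 1 + 2 * (-lo)) with hSdef
    have hleast : ∀ t, 0 ≤ t → t < S → ¬ pvYd v t ≤ 2 * lo := by
      intro t ht htS hP
      exact hPS1 (pvP_mono lo v hlo t (S - 1) ht (by omega) hP)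
    have hmain := pvALoop_eq lo hi m v S hlo hS1 hPS hleast S.toNat 0 0 (by omega) le_rfl
      (by unfold pvYd; ring)
    simpa using hmain

-- the two folds agree element by element
lemma pvFold_eq (lo hi m : Int) (xs acc : List Int) :
    xs.foldl (fun acc v => acc ++ pvALoop lo hi m 0 0 v) acc =
      xs.foldl (fun acc v =>
        if 0 ≤ lo then acc
        else
          acc ++ ((PySem.List.pyRange 1 (pvBsearch v (2 * lo) 1 (2 * max v 0 + 1 + 2 * (-lo)) + 1) 1).filter
              (fun s => decide (m ≤ s) && decide (2 * lo ≤ pvYd v s) && decide (pvYd v s ≤ 2 * hi))).map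
              (fun s => v - s)) acc := by
  induction xs generalizing acc with
  | nil => rfl
  | cons x xs ih =>
    simp only [List.foldl_cons]
    rw [pvBody_eq lo hi m x]
    by_cases hlo : 0 ≤ lo
    · rw [if_pos hlo, if_pos hlo, List.append_nil]
      exact ih acc
    · rw [if_neg hlo, if_neg hlo]
      exact ih _

-- ===== VERDICT (by name: the statement is the Claim_ definition above) =====
theorem Y_Velocities_spec : Claim_equal_Y_Velocities := by
  intro y_range x_velocities _ _
  unfold Spec_Y_Velocities Y_Velocities Y_Velocities_alt
  cases x_velocities with
  | nil => rfl
  | cons x xs => exact pvFold_eq _ _ _ (x :: xs) []
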